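-- pv_equiv track=rewrite | github.com/pypi-data/pypi-mirror-354 | packages/CNSistent/cnsistent-0.8.0-py3-none-any.whl/cns/process/segments.py | filter_cons_size
-- ===== SOURCE A (Python) =====
-- def filter_cons_size(chr_segs, min_size):
--     """
--     Filters segments based on a minimum size, keeping only consecutive segments.
--
--     Parameters
--     ----------
--     segs : dict
--         Dictionary of segments with chromosome names as keys and list of segments as values.
--     min_size : int
--         Minimum size of segments to keep.
--
--     Returns
--     -------
--     dict
--         Dictionary of filtered segments.
--     """
--     res = {}
--     for chrom, seg_group in chr_segs.items():
--         cons_groups = get_consecutive_segs(seg_group)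
--         res[chrom] = []
--         for con_group in cons_groups:
--             if con_group[-1][1] - con_group[0][0] >= min_size:
--                 res[chrom] += con_group
--     return res
--
-- def get_consecutive_segs(segs):
--     """
--     Groups consecutive segments for each chromosome.
--
--     Parameters
--     ----------
--     segs : list of tuples
--         List of segments for a chromosome.
--
--     Returns
--     -------
--     list of lists
--         List of lists of consecutive segments.
--     """
--     if len(segs) == 0:
--         return []
--     res = []
--     last_end = segs[0][1]
--     res.append([segs[0]])
--     for seg in segs[1:]:
--         if seg[0] == last_end:
--             res[-1].append(seg)
--         else:
--             res.append([seg])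
--         last_end = seg[1]
--     return res
-- ===== SOURCE B (Python) =====
-- def filter_cons_size(chr_segs, min_size):
--     """Single fused pass per chromosome: maintain the current consecutive run
--     (its buffered segments, first start and running last end) and flush it into
--     the output when the run breaks or ends, keeping it only if large enough."""
--     res = {}
--     for chrom, segs in chr_segs.items():
--         out = []
--         run = []
--         first = 0
--         last = 0
--         for seg in segs:
--             if run and seg[0] == last:
--                 run.append(seg)
--             else:
--                 if run and last - first >= min_size:
--                     out.extend(run)
--                 run = [seg]
--                 first = seg[0]
--             last = seg[1]
--         if run and last - first >= min_size:
--             out.extend(run)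
--         res[chrom] = out
--     return res
-- ===== Notes on version B (the rewrite author's own statement) =====
-- stated objective: simpler
-- what changed: B fuses A's two phases (build a list of consecutive-run groups, then filter groups by span and concatenate) into one pass per chromosome that keeps only the current run's buffer, first start and running last end, flushing the run when it breaks or ends.
import Mathlib
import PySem

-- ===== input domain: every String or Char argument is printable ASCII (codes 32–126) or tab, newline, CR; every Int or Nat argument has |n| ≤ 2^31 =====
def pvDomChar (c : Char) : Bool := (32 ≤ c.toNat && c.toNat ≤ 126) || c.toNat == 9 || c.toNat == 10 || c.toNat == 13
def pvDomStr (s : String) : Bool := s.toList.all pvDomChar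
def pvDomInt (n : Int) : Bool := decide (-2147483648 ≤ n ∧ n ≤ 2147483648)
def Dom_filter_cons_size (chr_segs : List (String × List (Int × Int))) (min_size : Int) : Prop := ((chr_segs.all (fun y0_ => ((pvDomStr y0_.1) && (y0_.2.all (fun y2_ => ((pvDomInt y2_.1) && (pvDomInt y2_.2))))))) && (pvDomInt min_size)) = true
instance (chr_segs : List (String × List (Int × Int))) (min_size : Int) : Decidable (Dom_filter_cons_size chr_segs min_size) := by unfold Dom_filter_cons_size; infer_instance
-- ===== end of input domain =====

-- B fuses A's two phases (group consecutive segments, then filter groups by span) into one pass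
-- per chromosome keeping only the current run's buffer, first start and running last end (objective: simpler).


-- ===== PORT A =====
-- res[-1].append(seg): replace the last group by itself with seg appended (res is never empty here)
def pvAppendLast (res : List (List (Int × Int))) (seg : Int × Int) : List (List (Int × Int)) :=
  res.dropLast ++ [(res.getLast?.getD []) ++ [seg]]

-- literal port of get_consecutive_segs
def get_consecutive_segs (segs : List (Int × Int)) : List (List (Int × Int)) :=
  match segs with
  | [] => []
  | s0 :: rest =>
    (rest.foldl
      (fun (st : List (List (Int × Int)) × Int) seg =>
        if seg.1 = st.2 then (pvAppendLast st.1 seg, seg.2) else (st.1 ++ [[seg]], seg.2))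
      ([[s0]], s0.2)).1

-- one inner-loop step: "if con_group[-1][1] - con_group[0][0] >= min_size: res[chrom] += con_group"
-- (con_group is always nonempty, so the unreachable arm leaving res unchanged is never taken;
--  res[chrom] += g is the augmented assignment res[chrom] = res[chrom] + g)
def pvStepA (min_size : Int) (chrom : String) (r : PySem.Dict String (List (Int × Int)))
    (g : List (Int × Int)) : PySem.Dict String (List (Int × Int)) :=
  match PySem.List.pyGet? g (-1), PySem.List.pyGet? g 0 with
  | some l, some f => if l.2 - f.1 ≥ min_size then r.insert chrom (r.getD chrom [] ++ g) else r
  | _, _ => r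

def filter_cons_size (chr_segs : List (String × List (Int × Int))) (min_size : Int) :
    List (String × List (Int × Int)) :=
  (chr_segs.foldl
    (fun (res : PySem.Dict String (List (Int × Int))) p =>
      let cons_groups := get_consecutive_segs p.2
      cons_groups.foldl (pvStepA min_size p.1) (res.insert p.1 []))
    PySem.Dict.empty).items

-- ===== PORT B =====
-- flush the completed run into out, keeping it only if it is nonempty and spans at least min_size
def pvFlush (min_size first last : Int) (out run : List (Int × Int)) : List (Int × Int) :=
  if run ≠ [] ∧ last - first ≥ min_size then out ++ run else out

-- state (out, run, first, last) of B's single pass over one chromosome's segments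
def pvStepB (min_size : Int) (st : List (Int × Int) × List (Int × Int) × Int × Int)
    (seg : Int × Int) : List (Int × Int) × List (Int × Int) × Int × Int :=
  if st.2.1 ≠ [] ∧ seg.1 = st.2.2.2 then (st.1, st.2.1 ++ [seg], st.2.2.1, seg.2)
  else (pvFlush min_size st.2.2.1 st.2.2.2 st.1 st.2.1, [seg], seg.1, seg.2)

def pvChromB (min_size : Int) (segs : List (Int × Int)) : List (Int × Int) :=
  let st := segs.foldl (pvStepB min_size) ([], [], 0, 0)
  pvFlush min_size st.2.2.1 st.2.2.2 st.1 st.2.1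

def filter_cons_size_alt (chr_segs : List (String × List (Int × Int))) (min_size : Int) :
    List (String × List (Int × Int)) :=
  (chr_segs.foldl
    (fun (res : PySem.Dict String (List (Int × Int))) p => res.insert p.1 (pvChromB min_size p.2))
    PySem.Dict.empty).items

-- ===== PRECONDITION & SPEC =====
def Spec_filter_cons_size (chr_segs : List (String × List (Int × Int))) (min_size : Int) (out : List (String × List (Int × Int))) : Prop := out = filter_cons_size_alt chr_segs min_size
instance (chr_segs : List (String × List (Int × Int))) (min_size : Int) (out : List (String × List (Int × Int))) : Decidable (Spec_filter_cons_size chr_segs min_size out) := by unfold Spec_filter_cons_size; infer_instance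

-- ===== CLAIM (what is proved, stated in full; the proofs are below) =====
def Claim_equal_filter_cons_size : Prop := ∀ (chr_segs : List (String × List (Int × Int))) (min_size : Int), Dom_filter_cons_size chr_segs min_size → Spec_filter_cons_size chr_segs min_size (filter_cons_size chr_segs min_size)

-- ===== LEMMAS AND PROOFS =====

-- A's per-group keep-step expressed on a plain list accumulator
def pvKeep (min_size : Int) (out g : List (Int × Int)) : List (Int × Int) :=
  match PySem.List.pyGet? g (-1), PySem.List.pyGet? g 0 with
  | some l, some f => if l.2 - f.1 ≥ min_size then out ++ g else out
  | _, _ => out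

theorem pvStepA_insert (m : Int) (c : String) (d : PySem.Dict String (List (Int × Int)))
    (v g : List (Int × Int)) :
    pvStepA m c (d.insert c v) g = d.insert c (pvKeep m v g) := by
  unfold pvStepA pvKeep
  rcases hg1 : PySem.List.pyGet? g (-1) with _ | l <;> rcases hg0 : PySem.List.pyGet? g 0 with _ | f <;> simp
  split <;> simp [PySem.Dict.insert_insert_self]

theorem foldl_stepA_insert (m : Int) (c : String) (gs : List (List (Int × Int)))
    (d : PySem.Dict String (List (Int × Int))) (v : List (Int × Int)) :
    gs.foldl (pvStepA m c) (d.insert c v) = d.insert c (gs.foldl (pvKeep m) v) := by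
  induction gs generalizing v with
  | nil => rfl
  | cons g gs ih => simp [List.foldl_cons, pvStepA_insert, ih]

theorem pyGet?_neg_one (c0 : Int × Int) (t : List (Int × Int)) :
    PySem.List.pyGet? (c0 :: t) (-1) = some ((c0 :: t).getLast (by simp)) := by
  simp [PySem.List.pyGet?, PySem.List.pyIdx?]
  rw [List.getLast_eq_getElem]
  rfl

theorem pvKeep_run (m : Int) (out : List (Int × Int)) (c0 : Int × Int) (t : List (Int × Int)) :
    pvKeep m out (c0 :: t) =
      pvFlush m c0.1 ((c0 :: t).getLast (by simp)).2 out (c0 :: t) := by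
  unfold pvKeep pvFlush
  rw [pyGet?_neg_one]
  simp [PySem.List.pyGet?, PySem.List.pyIdx?]

-- main invariant: A's grouping loop followed by the keep-fold equals B's fused loop
theorem main_inv (m : Int) (rest : List (Int × Int)) (gs : List (List (Int × Int)))
    (c0 : Int × Int) (t : List (Int × Int)) :
    ((rest.foldl
        (fun (st : List (List (Int × Int)) × Int) seg =>
          if seg.1 = st.2 then (pvAppendLast st.1 seg, seg.2) else (st.1 ++ [[seg]], seg.2))
        (gs ++ [c0 :: t], ((c0 :: t).getLast (by simp)).2)).1).foldl (pvKeep m) []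
    = (let st := rest.foldl (pvStepB m)
          (gs.foldl (pvKeep m) [], c0 :: t, c0.1, ((c0 :: t).getLast (by simp)).2)
       pvFlush m st.2.2.1 st.2.2.2 st.1 st.2.1) := by
  induction rest generalizing gs c0 t with
  | nil =>
    simp [List.foldl_append, pvKeep_run]
  | cons seg rest ih =>
    by_cases h : seg.1 = ((c0 :: t).getLast (by simp)).2
    · have hA : pvAppendLast (gs ++ [c0 :: t]) seg = gs ++ [c0 :: (t ++ [seg])] := by
        simp [pvAppendLast]
      have hL : ((c0 :: (t ++ [seg])).getLast (by simp)).2 = seg.2 := by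
        simp [List.getLast_eq_getElem]
      have := ih gs c0 (t ++ [seg])
      rw [hL] at this
      simp only [List.foldl_cons, hA, if_pos h]
      rw [show pvStepB m (gs.foldl (pvKeep m) [], c0 :: t, c0.1,
            ((c0 :: t).getLast (by simp)).2) seg
          = (gs.foldl (pvKeep m) [], c0 :: (t ++ [seg]), c0.1, seg.2) by
        simp [pvStepB, h]]
      exact this
    · have hB : pvStepB m (gs.foldl (pvKeep m) [], c0 :: t, c0.1, ((c0 :: t).getLast (by simp)).2) seg
          = (pvFlush m c0.1 ((c0 :: t).getLast (by simp)).2 (gs.foldl (pvKeep m) []) (c0 :: t),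
             [seg], seg.1, seg.2) := by
        simp [pvStepB, h]
      have := ih (gs ++ [c0 :: t]) seg []
      simp only [List.foldl_cons, if_neg h, hB]
      rw [show ((( [seg] : List (Int × Int))).getLast (by simp)).2 = seg.2 from rfl] at this
      rw [this]
      simp [List.foldl_append, pvKeep_run, pvFlush]

theorem chrom_eq (m : Int) (segs : List (Int × Int)) :
    (get_consecutive_segs segs).foldl (pvKeep m) [] = pvChromB m segs := by
  cases segs with
  | nil => rfl
  | cons s0 rest =>
    unfold get_consecutive_segs pvChromB
    have := main_inv m rest [] s0 []
    simpa [pvStepB] using this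

theorem fold_eq (m : Int) (l : List (String × List (Int × Int)))
    (d : PySem.Dict String (List (Int × Int))) :
    l.foldl (fun res p =>
        (get_consecutive_segs p.2).foldl (pvStepA m p.1) (res.insert p.1 [])) d
    = l.foldl (fun res p => res.insert p.1 (pvChromB m p.2)) d := by
  induction l generalizing d with
  | nil => rfl
  | cons p ps ih =>
    simp only [List.foldl_cons, foldl_stepA_insert, chrom_eq]

theorem filter_cons_size_spec0 : ∀ chr_segs min_size,
    filter_cons_size chr_segs min_size = filter_cons_size_alt chr_segs min_size := by
  intro chr_segs m
  unfold filter_cons_size filter_cons_size_alt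
  rw [fold_eq]

-- ===== VERDICT (by name: the statement is the Claim_ definition above) =====
theorem filter_cons_size_spec : Claim_equal_filter_cons_size := by
  intro chr_segs m _
  unfold Spec_filter_cons_size
  exact filter_cons_size_spec0 chr_segs m
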